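-- pv_equiv track=rewrite | github.com/sidd-kishan/ABHADRA | bfpio.py | optimize_bf_code
-- ===== SOURCE A (Python) =====
-- from typing import List, Tuple
--
-- BF_COMMANDS = "><+-[].,"
--
-- def optimize_bf_code(bf_code: str, suppress: bool = True) -> List[Tuple[str, int]]:
--     """Expands and optimizes Brainfuck into command/macro tuples with pointer I/O control."""
--     clean_code = [c for c in bf_code if c in BF_COMMANDS]
--     optimized = []
--     last_data_mutation = False
--
--     i = 0
--     while i < len(clean_code):
--         c = clean_code[i]
--
--         if c in '><':
--             # Identify full sequence of pointer movement
--             start = i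
--             while i < len(clean_code) and clean_code[i] in '><':
--                 i += 1
--             group = clean_code[start:i]
--
--             if not suppress:
--                 for j, move in enumerate(group):
--                     if last_data_mutation:
--                         optimized.append(('send_from_y', start + j))
--                         optimized.append(('send_from_x', start + j))
--                     optimized.append((move, start + j))
--                     optimized.append(('send_from_y', start + j))
--                     optimized.append(('bring_into_x', start + j))
--                 last_data_mutation = False
--             else:
--                 # Suppress redundant I/O: only emit I/O at start (if needed) and end
--                 if last_data_mutation:
--                     optimized.append(('send_from_y', start))
--                     optimized.append(('send_from_x', start))
--                 for j, move in enumerate(group):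
--                     optimized.append((move, start + j))
--                     if j == len(group) - 1:
--                         optimized.append(('send_from_y', start + j))
--                         optimized.append(('bring_into_x', start + j))
--                 last_data_mutation = False
--         else:
--             optimized.append((c, i))
--             if c in '+-':
--                 last_data_mutation = True
--             elif c in '.,':
--                 optimized.append(('send_from_y', i))
--                 optimized.append(('bring_into_x', i))
--                 last_data_mutation = False
--             elif c in '[]':
--                 last_data_mutation = False
--             i += 1
--
--     return optimized
-- ===== SOURCE B (Python) =====
-- BF_COMMANDS = "><+-[].,"
--
-- def optimize_bf_code(bf_code: str, suppress: bool = True):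
--     """Two-pass version: first materialize a token list (pointer-move runs collapsed,
--     every other command a single token), then emit command/I-O tuples per token."""
--     clean = [c for c in bf_code if c in BF_COMMANDS]
--
--     # pass 1: build the token list
--     tokens = []           # ('run', start, chars) or (cmd, idx, None)
--     run = []
--     for i, c in enumerate(clean):
--         if c in '><':
--             run.append(c)
--         else:
--             if run:
--                 tokens.append(('run', i - len(run), run))
--                 run = []
--             tokens.append((c, i, None))
--     if run:
--         tokens.append(('run', len(clean) - len(run), run))
--
--     # pass 2: emit tuples token by token
--     out = []
--     mut = False
--     for kind, idx, payload in tokens: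
--         if kind == 'run':
--             if not suppress:
--                 for j, m in enumerate(payload):
--                     k = idx + j
--                     if mut:
--                         out += [('send_from_y', k), ('send_from_x', k)]
--                     out += [(m, k), ('send_from_y', k), ('bring_into_x', k)]
--             else:
--                 if mut:
--                     out += [('send_from_y', idx), ('send_from_x', idx)]
--                 out += [(m, idx + j) for j, m in enumerate(payload)]
--                 k = idx + len(payload) - 1
--                 out += [('send_from_y', k), ('bring_into_x', k)]
--             mut = False
--         else:
--             out.append((kind, idx))
--             if kind in '+-':
--                 mut = True
--             else:
--                 if kind in '.,':
--                     out += [('send_from_y', idx), ('bring_into_x', idx)]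
--                 mut = False
--     return out
-- ===== Notes on version B (the rewrite author's own statement) =====
-- stated objective: alternative
-- what changed: B replaces A's single index-driven while-loop with an inner run-scanning while by a two-pass pipeline: a first pass materializes an explicit token list (maximal '><' runs collapsed into run tokens with their start index, other commands single tokens), and a second pass folds over that token list emitting the tuples, with the suppressed run emitted as a plain move map plus one trailing I/O pair instead of a per-iteration last-index test.
import Mathlib
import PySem

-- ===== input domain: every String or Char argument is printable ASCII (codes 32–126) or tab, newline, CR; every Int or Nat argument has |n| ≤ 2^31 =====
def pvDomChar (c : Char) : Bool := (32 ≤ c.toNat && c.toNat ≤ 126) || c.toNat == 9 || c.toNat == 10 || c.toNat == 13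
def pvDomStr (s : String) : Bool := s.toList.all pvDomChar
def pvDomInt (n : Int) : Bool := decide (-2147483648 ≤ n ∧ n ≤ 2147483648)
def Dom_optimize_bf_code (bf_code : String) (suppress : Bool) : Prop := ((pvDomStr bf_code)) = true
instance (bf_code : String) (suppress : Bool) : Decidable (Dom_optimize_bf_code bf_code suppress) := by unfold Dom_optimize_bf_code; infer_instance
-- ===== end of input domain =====

-- B restructures A into two passes (explicit token list, then an emission fold); same output, same cost ("alternative", not faster).

-- ===== PORT A =====

def pvIsBF (c : Char) : Bool :=
  c = '>' || c = '<' || c = '+' || c = '-' || c = '[' || c = ']' || c = '.' || c = ','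

def pvIsMove (c : Char) : Bool := c = '>' || c = '<'

-- A's non-suppressed run loop: `for j, move in enumerate(group)` with `k = start + j`
def aNoSup (md : Bool) : List Char → Int → List (String × Int)
  | [], _ => []
  | m :: ms, k =>
    (if md then [("send_from_y", k), ("send_from_x", k)] else [])
      ++ [(m.toString, k), ("send_from_y", k), ("bring_into_x", k)]
      ++ aNoSup md ms (k + 1)

-- A's suppressed run loop: emit the move, and the I/O pair only when j == len(group) - 1
def aSupGo (n : Int) (start : Int) : List Char → Int → List (String × Int)
  | [], _ => []
  | m :: ms, j =>
    [(m.toString, start + j)]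
      ++ (if j = n - 1 then [("send_from_y", start + j), ("bring_into_x", start + j)] else [])
      ++ aSupGo n start ms (j + 1)

-- A's outer while-loop over clean_code, the inner run-scanning while rendered as takeWhile/dropWhile
def aLoop (s : Bool) : List Char → Int → Bool → List (String × Int)
  | [], _, _ => []
  | c :: cs, i, md =>
    if pvIsMove c then
      let group := c :: cs.takeWhile pvIsMove
      let rest := cs.dropWhile pvIsMove
      (if !s then aNoSup md group i
       else (if md then [("send_from_y", i), ("send_from_x", i)] else [])
              ++ aSupGo (group.length : Int) i group 0)
        ++ aLoop s rest (i + (group.length : Int)) false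
    else
      ((c.toString, i)
          :: (if c = '+' || c = '-' then []
              else if c = '.' || c = ',' then [("send_from_y", i), ("bring_into_x", i)]
              else []))
        ++ aLoop s cs (i + 1)
            (if c = '+' || c = '-' then true
             else false)
termination_by xs => xs.length
decreasing_by
  · simpa using Nat.lt_succ_of_le (List.length_dropWhile_le _ _)
  · simp

def optimize_bf_code (bf_code : String) (suppress : Bool) : List (String × Int) :=
  aLoop suppress (bf_code.toList.filter pvIsBF) 0 false

-- ===== PORT B =====

inductive PvTok : Type
  | run : Int → List Char → PvTok
  | one : Int → Char → PvTok
deriving DecidableEq, Repr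

-- pass 1 of Source B: fold over the cleaned code, keeping the pending '><' run, flushing it at the end
def bTokGo : List Char → Int → List Char → List PvTok → List PvTok
  | [], i, run, toks =>
    if run = [] then toks else toks ++ [PvTok.run (i - (run.length : Int)) run]
  | c :: cs, i, run, toks =>
    if pvIsMove c then bTokGo cs (i + 1) (run ++ [c]) toks
    else if run = [] then bTokGo cs (i + 1) [] (toks ++ [PvTok.one i c])
    else bTokGo cs (i + 1) [] (toks ++ [PvTok.run (i - (run.length : Int)) run, PvTok.one i c])
termination_by xs => xs.length

-- Source B's `[(m, idx + j) for j, m in enumerate(payload)]`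
def bMoves : List Char → Int → List (String × Int)
  | [], _ => []
  | m :: ms, k => (m.toString, k) :: bMoves ms (k + 1)

-- Source B's non-suppressed per-move emission for a run token
def bRunNS : Bool → List Char → Int → List (String × Int)
  | _, [], _ => []
  | md, m :: ms, k =>
    (if md then [("send_from_y", k), ("send_from_x", k)] else [])
      ++ ([(m.toString, k), ("send_from_y", k), ("bring_into_x", k)] ++ bRunNS md ms (k + 1))

-- tuples a token contributes, given the incoming last_data_mutation flag
def bTokBody (suppress : Bool) (md : Bool) : PvTok → List (String × Int)
  | PvTok.run idx chars =>
    if !suppress then bRunNS md chars idx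
    else
      (if md then [("send_from_y", idx), ("send_from_x", idx)] else [])
        ++ bMoves chars idx
        ++ [("send_from_y", idx + (chars.length : Int) - 1),
            ("bring_into_x", idx + (chars.length : Int) - 1)]
  | PvTok.one idx c =>
    (c.toString, idx)
      :: (if c = '+' || c = '-' then []
          else if c = '.' || c = ',' then [("send_from_y", idx), ("bring_into_x", idx)]
          else [])

-- last_data_mutation after a token
def bTokMut : PvTok → Bool
  | PvTok.run _ _ => false
  | PvTok.one _ c => if c = '+' || c = '-' then true else false

-- pass 2 of Source B: one fold step
def bEmitTok (suppress : Bool) (st : List (String × Int) × Bool) (t : PvTok) :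
    List (String × Int) × Bool :=
  (st.1 ++ bTokBody suppress st.2 t, bTokMut t)

def optimize_bf_code_alt (bf_code : String) (suppress : Bool) : List (String × Int) :=
  let clean := bf_code.toList.filter pvIsBF
  ((bTokGo clean 0 [] []).foldl (bEmitTok suppress) ([], false)).1

-- ===== PRECONDITION & SPEC =====
def Spec_optimize_bf_code (bf_code : String) (suppress : Bool) (out : List (String × Int)) : Prop := out = optimize_bf_code_alt bf_code suppress
instance (bf_code : String) (suppress : Bool) (out : List (String × Int)) : Decidable (Spec_optimize_bf_code bf_code suppress out) := by unfold Spec_optimize_bf_code; infer_instance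

-- ===== CLAIM (what is proved, stated in full; the proofs are below) =====
def Claim_equal_optimize_bf_code : Prop := ∀ (bf_code : String) (suppress : Bool), Dom_optimize_bf_code bf_code suppress → Spec_optimize_bf_code bf_code suppress (optimize_bf_code bf_code suppress)

-- ===== LEMMAS AND PROOFS =====

theorem bTokGo_append (xs : List Char) (i : Int) (r : List Char) (toks : List PvTok) :
    bTokGo xs i r toks = toks ++ bTokGo xs i r [] := by
  induction xs generalizing i r toks with
  | nil => simp [bTokGo]; split <;> simp
  | cons c cs ih =>
    simp only [bTokGo]
    split
    · exact ih _ _ _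
    · split
      · rw [ih (i + 1) [] (toks ++ [PvTok.one i c]), List.nil_append,
          ih (i + 1) [] [PvTok.one i c]]
        simp
      · rw [ih (i + 1) [] (toks ++ [PvTok.run (i - (r.length : Int)) r, PvTok.one i c]),
          List.nil_append, ih (i + 1) [] [PvTok.run (i - (r.length : Int)) r, PvTok.one i c]]
        simp

theorem bTokGo_pending (ys : List Char) (k : Int) (r : List Char) (hr : r ≠ []) :
    bTokGo ys k r [] =
      PvTok.run (k - (r.length : Int)) (r ++ ys.takeWhile pvIsMove)
        :: bTokGo (ys.dropWhile pvIsMove) (k + ((ys.takeWhile pvIsMove).length : Int)) [] [] := by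
  induction ys generalizing k r with
  | nil => simp [bTokGo, hr]
  | cons y ys ih =>
    by_cases hy : pvIsMove y
    · simp only [bTokGo, hy, if_pos, List.takeWhile_cons, List.dropWhile_cons]
      rw [ih (k + 1) (r ++ [y]) (by simp)]
      have h1 : k + 1 - ((r ++ [y]).length : Int) = k - (r.length : Int) := by
        simp only [List.length_append, List.length_cons, List.length_nil]; push_cast; ring
      have h2 : (r ++ [y]) ++ List.takeWhile pvIsMove ys = r ++ (y :: List.takeWhile pvIsMove ys) := by
        simp
      have h3 : k + 1 + ((List.takeWhile pvIsMove ys).length : Int)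
          = k + ((y :: List.takeWhile pvIsMove ys).length : Int) := by
        push_cast [List.length_cons]; ring
      rw [h1, h2, h3]
    · have htw : List.takeWhile pvIsMove (y :: ys) = [] := by
        simp [List.takeWhile_cons, hy]
      have hdw : List.dropWhile pvIsMove (y :: ys) = y :: ys := by
        simp [List.dropWhile_cons, hy]
      rw [htw, hdw]
      simp only [List.length_nil, Nat.cast_zero, add_zero, List.append_nil]
      conv_lhs => rw [bTokGo]
      conv_rhs => rw [bTokGo]
      simp only [hy, Bool.false_eq_true, if_false, if_neg, not_false_iff, hr, if_true, if_pos,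
        List.nil_append]
      rw [bTokGo_append ys (k + 1) [] [PvTok.run (k - (r.length : Int)) r, PvTok.one k y],
        bTokGo_append ys (k + 1) [] [PvTok.one k y]]
      simp

theorem aNoSup_eq_bRunNS (md : Bool) (g : List Char) (k : Int) :
    aNoSup md g k = bRunNS md g k := by
  induction g generalizing k with
  | nil => rfl
  | cons m ms ih => simp [aNoSup, bRunNS, ih]

theorem aSupGo_eq (n : Int) (start : Int) (ms : List Char) (j : Int)
    (hms : ms ≠ []) (hn : j + (ms.length : Int) = n) :
    aSupGo n start ms j =
      bMoves ms (start + j) ++ [("send_from_y", start + n - 1), ("bring_into_x", start + n - 1)] := by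
  induction ms generalizing j with
  | nil => exact absurd rfl hms
  | cons m ms ih =>
    cases ms with
    | nil =>
      have hj : j = n - 1 := by simp at hn; omega
      simp [aSupGo, bMoves, hj]
      omega
    | cons m' ms' =>
      have hj : ¬ (j = n - 1) := by
        simp only [List.length_cons] at hn; push_cast at hn; omega
      have hih := ih (j + 1) (by simp)
        (by simp only [List.length_cons] at hn ⊢; push_cast at hn ⊢; omega)
      conv_lhs => rw [aSupGo]
      rw [if_neg hj, hih]
      simp [bMoves, add_assoc]

-- the core simulation: folding B's emission over B's tokens of xs equals A's loop on xs
theorem main_sim (s : Bool) (n : ℕ) :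
    ∀ (xs : List Char), xs.length ≤ n → ∀ (i : Int) (md : Bool) (out : List (String × Int)),
      ((bTokGo xs i [] []).foldl (bEmitTok s) (out, md)).1 = out ++ aLoop s xs i md := by
  induction n with
  | zero =>
    intro xs hx i md out
    have : xs = [] := List.length_eq_zero_iff.mp (Nat.le_zero.mp hx)
    subst this
    simp [bTokGo, aLoop]
  | succ n ih =>
    intro xs hx i md out
    cases xs with
    | nil => simp [bTokGo, aLoop]
    | cons c cs =>
      by_cases hc : pvIsMove c
      · -- run token
        have hg : bTokGo (c :: cs) i [] [] =
            PvTok.run i (c :: cs.takeWhile pvIsMove)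
              :: bTokGo (cs.dropWhile pvIsMove) (i + 1 + ((cs.takeWhile pvIsMove).length : Int)) [] [] := by
          simp only [bTokGo, hc, if_pos, List.nil_append]
          rw [bTokGo_pending cs (i + 1) [c] (by simp)]
          simp
        rw [hg]
        simp only [List.foldl_cons, bEmitTok]
        have hlen : (cs.dropWhile pvIsMove).length ≤ n := by
          have h1 := List.length_dropWhile_le pvIsMove cs
          simp at hx; omega
        rw [ih _ hlen]
        have hidx : i + 1 + ((cs.takeWhile pvIsMove).length : Int)
            = i + ((c :: cs.takeWhile pvIsMove).length : Int) := by
          simp only [List.length_cons]; push_cast; ring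
        rw [hidx]
        simp only [aLoop, hc, if_pos, List.append_assoc]
        congr 2
        by_cases hs : s
        · -- suppressed
          simp only [bTokBody, hs, Bool.not_true, Bool.false_eq_true, if_false]
          rw [aSupGo_eq ((c :: cs.takeWhile pvIsMove).length : Int) i _ 0 (by simp) (by simp)]
          simp
        · simp only [bTokBody, hs, Bool.not_false, if_pos]
          rw [aNoSup_eq_bRunNS]
      · -- single-command token
        have hg : bTokGo (c :: cs) i [] [] =
            PvTok.one i c :: bTokGo cs (i + 1) [] [] := by
          simp only [bTokGo, hc, Bool.false_eq_true, if_neg, not_false_iff, if_pos, List.nil_append]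
          rw [bTokGo_append]
          simp
        rw [hg]
        simp only [List.foldl_cons, bEmitTok]
        have hlen : cs.length ≤ n := by simp at hx; omega
        rw [ih _ hlen]
        simp only [aLoop, hc, Bool.false_eq_true, if_neg, not_false_iff]
        simp [bTokBody, bTokMut]

-- ===== VERDICT (by name: the statement is the Claim_ definition above) =====
theorem optimize_bf_code_spec : Claim_equal_optimize_bf_code := by
  intro bf s _
  unfold Spec_optimize_bf_code optimize_bf_code
  show aLoop s (bf.toList.filter pvIsBF) 0 false
      = ((bTokGo (bf.toList.filter pvIsBF) 0 [] []).foldl (bEmitTok s) ([], false)).1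
  rw [main_sim s (bf.toList.filter pvIsBF).length _ le_rfl]
  simp
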